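-- pv_equiv track=rewrite | github.com/Rajk-Prog1/hw5-kovacsgina99 | tasks/eggs.py | eggs_solution
-- ===== SOURCE A (Python) =====
-- def eggs_solution(breaks):
--     low_floor = 0
--     high_floor = 99
--
--     while (low_floor + 10) <= high_floor: # 10-esével megyünk végig az emeleteken
--         if low_floor + 10 >= breaks: # megvizsgáljuk, hogy afölött az emelet fölött vagyunk-e, ahol összetört az első tojás
--             break # összetörik a tojás + megtörik a ciklus
--         else:
--             low_floor = low_floor + 10 # ha még nem tört össze, akkor feljebb visszük azt az emeletet, ameddig vizsgálunk
--     while (low_floor + 1) <= high_floor: # egyesével nézzük meg az emeleteket: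
--         if low_floor + 1 >= breaks: # legmagasabb emelet, ahol még nem törik össze
--             break # összetörik a tojás + megtörik a ciklus
--         else:
--             low_floor = low_floor + 1
--
--     return low_floor # legmagasabb szint, ahol még nem törik össze
-- ===== SOURCE B (Python) =====
-- def eggs_solution(breaks):
--     # Closed-form clamp: highest floor below the break point, clamped to [0, 99].
--     return max(0, min(99, breaks - 1))
-- ===== Notes on version B (the rewrite author's own statement) =====
-- stated objective: simpler
-- what changed: Replaced A's two-phase coarse(+10)/fine(+1) upward scan with the closed-form clamp max(0, min(99, breaks-1)).
import Mathlib
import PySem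

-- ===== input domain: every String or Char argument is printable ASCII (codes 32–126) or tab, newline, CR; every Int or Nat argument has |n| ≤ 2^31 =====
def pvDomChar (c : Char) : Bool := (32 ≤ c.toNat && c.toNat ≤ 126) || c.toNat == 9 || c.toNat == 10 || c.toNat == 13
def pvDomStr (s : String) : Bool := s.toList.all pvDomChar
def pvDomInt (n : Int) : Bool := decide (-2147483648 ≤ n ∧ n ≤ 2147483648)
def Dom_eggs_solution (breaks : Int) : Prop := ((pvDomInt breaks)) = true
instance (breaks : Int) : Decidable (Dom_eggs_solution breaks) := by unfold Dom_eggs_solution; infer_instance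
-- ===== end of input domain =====

-- B replaces A's two-phase coarse(+10)/fine(+1) scan with the closed-form clamp max(0, min(99, breaks-1)) (simpler).

-- ===== PORT A =====
-- first while loop: step +10 while low+10 <= 99, break when low+10 >= breaks
def eggsCoarse (breaks low : Int) : Int :=
  if low + 10 ≤ 99 then
    if low + 10 ≥ breaks then low else eggsCoarse breaks (low + 10)
  else low
termination_by (99 - low).toNat
decreasing_by omega

-- second while loop: step +1 while low+1 <= 99, break when low+1 >= breaks
def eggsFine (breaks low : Int) : Int :=
  if low + 1 ≤ 99 then
    if low + 1 ≥ breaks then low else eggsFine breaks (low + 1)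
  else low
termination_by (99 - low).toNat
decreasing_by omega

def eggs_solution (breaks : Int) : Int :=
  eggsFine breaks (eggsCoarse breaks 0)

-- ===== PORT B =====
def eggs_solution_alt (breaks : Int) : Int := max 0 (min 99 (breaks - 1))

-- ===== PRECONDITION & SPEC =====
def Spec_eggs_solution (breaks : Int) (out : Int) : Prop := out = eggs_solution_alt breaks
instance (breaks : Int) (out : Int) : Decidable (Spec_eggs_solution breaks out) := by unfold Spec_eggs_solution; infer_instance

-- ===== CLAIM (what is proved, stated in full; the proofs are below) =====
def Claim_equal_eggs_solution : Prop := ∀ (breaks : Int), Dom_eggs_solution breaks → Spec_eggs_solution breaks (eggs_solution breaks)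

-- ===== LEMMAS AND PROOFS =====

-- the fine loop computes the clamp from any admissible start
theorem eggsFine_eq (n : ℕ) (breaks low : Int) (hn : (99 - low).toNat ≤ n)
    (h0 : 0 ≤ low) (h99 : low ≤ 99) :
    eggsFine breaks low = max low (min 99 (breaks - 1)) := by
  induction n generalizing low with
  | zero =>
    rw [eggsFine]
    have : low = 99 := by omega
    subst this
    simp
  | succ n ih =>
    rw [eggsFine]
    split_ifs with h1 h2
    · omega
    · rw [ih (low + 1) (by omega) (by omega) (by omega)]
      omega
    · omega

-- the coarse loop's result r satisfies 0 ≤ r ≤ 99 and (r = 0 ∨ r ≤ breaks - 1)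
theorem eggsCoarse_spec (n : ℕ) (breaks low : Int) (hn : (99 - low).toNat ≤ n)
    (h0 : 0 ≤ low) (h99 : low ≤ 99) (hinv : low = 0 ∨ low ≤ breaks - 1) :
    0 ≤ eggsCoarse breaks low ∧ eggsCoarse breaks low ≤ 99 ∧
      (eggsCoarse breaks low = 0 ∨ eggsCoarse breaks low ≤ breaks - 1) := by
  induction n generalizing low with
  | zero =>
    rw [eggsCoarse]
    have h1 : ¬ (low + 10 ≤ 99) := by omega
    simp only [h1, if_false]
    exact ⟨h0, h99, hinv⟩
  | succ n ih =>
    rw [eggsCoarse]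
    split_ifs with h1 h2
    · exact ⟨h0, h99, hinv⟩
    · exact ih (low + 10) (by omega) (by omega) (by omega) (by omega)
    · exact ⟨h0, h99, hinv⟩

-- ===== VERDICT (by name: the statement is the Claim_ definition above) =====
theorem eggs_solution_spec : Claim_equal_eggs_solution := by
  intro breaks _
  unfold Spec_eggs_solution eggs_solution eggs_solution_alt
  obtain ⟨hr0, hr99, hinv⟩ :=
    eggsCoarse_spec 99 breaks 0 (by omega) (by omega) (by omega) (by omega)
  rw [eggsFine_eq 99 breaks (eggsCoarse breaks 0) (by omega) hr0 hr99]
  omega
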